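-- pv_equiv track=rewrite | github.com/AniFeelaen/Urban-university | module_2_hard.py | count
-- ===== SOURCE A (Python) =====
-- def count(first_number):
--     result = []
--     for i in range(1, first_number):
--         for j in range(i+1, first_number): #используем i+1 чтобы не было дубляжей пар
--             if first_number % (i + j) == 0:
--                 result.append(i)
--                 result.append(j)
--     return result
-- ===== SOURCE B (Python) =====
-- def count(first_number):
--     n = first_number
--     divisors = [d for d in range(1, n + 1) if n % d == 0]
--     result = []
--     for i in range(1, n):
--         for d in divisors:
--             j = d - i
--             if i < j < n:
--                 result.append(i)
--                 result.append(j)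
--     return result
-- ===== Notes on version B (the rewrite author's own statement) =====
-- stated objective: faster
-- what changed: B precomputes the divisors of first_number once and, for each i, scans only those divisors (j = d - i with a bounds check) instead of scanning every j in range(i+1, n).
import Mathlib
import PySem

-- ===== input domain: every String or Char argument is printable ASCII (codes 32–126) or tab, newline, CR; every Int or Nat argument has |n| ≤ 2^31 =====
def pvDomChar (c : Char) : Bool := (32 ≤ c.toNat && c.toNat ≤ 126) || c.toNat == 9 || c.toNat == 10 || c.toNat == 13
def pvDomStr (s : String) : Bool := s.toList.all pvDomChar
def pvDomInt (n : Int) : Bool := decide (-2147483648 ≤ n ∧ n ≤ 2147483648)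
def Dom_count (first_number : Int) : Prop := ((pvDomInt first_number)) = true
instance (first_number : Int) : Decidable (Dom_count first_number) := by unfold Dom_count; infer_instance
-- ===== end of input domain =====

-- B precomputes the divisors of first_number once and scans only those per i (faster; A rescans all j).

-- ===== PORT A =====
def count (first_number : Int) : List Int :=
  (PySem.List.pyRange 1 first_number 1).foldl (fun result i =>
    (PySem.List.pyRange (i+1) first_number 1).foldl (fun result j =>
      if PySem.Int.mod first_number (i + j) = 0 then result ++ [i] ++ [j] else result) result) []

-- ===== PORT B =====
def count_alt (first_number : Int) : List Int :=
  let divisors := (PySem.List.pyRange 1 (first_number + 1) 1).filter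
    (fun d => decide (PySem.Int.mod first_number d = 0))
  (PySem.List.pyRange 1 first_number 1).foldl (fun result i =>
    divisors.foldl (fun result d =>
      let j := d - i
      if i < j ∧ j < first_number then result ++ [i] ++ [j] else result) result) []

-- ===== PRECONDITION & SPEC =====
def Spec_count (first_number : Int) (out : List Int) : Prop := out = count_alt first_number
instance (first_number : Int) (out : List Int) : Decidable (Spec_count first_number out) := by unfold Spec_count; infer_instance

-- ===== CLAIM (what is proved, stated in full; the proofs are below) =====
def Claim_equal_count : Prop := ∀ (first_number : Int), Dom_count first_number → Spec_count first_number (count first_number)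

-- ===== LEMMAS AND PROOFS =====

-- two sorted (strictly increasing) filtered ranges with the same admitted elements are equal
lemma filter_pyRange_eq_filter_pyRange (a b c d : Int) (p q : Int → Bool)
    (h : ∀ x : Int, ((a ≤ x ∧ x < b) ∧ p x = true) ↔ ((c ≤ x ∧ x < d) ∧ q x = true)) :
    (PySem.List.pyRange a b 1).filter p = (PySem.List.pyRange c d 1).filter q := by
  have sl : ((PySem.List.pyRange a b 1).filter p).Pairwise (· < ·) :=
    (PySem.List.pairwise_lt_pyRange_one a b).filter p
  have sr : ((PySem.List.pyRange c d 1).filter q).Pairwise (· < ·) :=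
    (PySem.List.pairwise_lt_pyRange_one c d).filter q
  have nl : ((PySem.List.pyRange a b 1).filter p).Nodup :=
    (PySem.List.nodup_pyRange_one a b).filter p
  have nr : ((PySem.List.pyRange c d 1).filter q).Nodup :=
    (PySem.List.nodup_pyRange_one c d).filter q
  have hperm : List.Perm ((PySem.List.pyRange a b 1).filter p) ((PySem.List.pyRange c d 1).filter q) := by
    rw [List.perm_ext_iff_of_nodup nl nr]
    intro x
    simp only [List.mem_filter, PySem.List.mem_pyRange_one]
    exact h x
  exact List.Perm.eq_of_pairwise (fun x y _ _ hxy hyx => le_antisymm hxy hyx)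
    (List.Pairwise.imp le_of_lt sl) (List.Pairwise.imp le_of_lt sr) hperm

-- shifting a unit-step range
lemma map_add_pyRange (i a b : Int) :
    (PySem.List.pyRange a b 1).map (fun j => i + j) = PySem.List.pyRange (i + a) (i + b) 1 := by
  rw [PySem.List.pyRange_one, PySem.List.pyRange_one, List.map_map]
  have : (i + b) - (i + a) = b - a := by ring
  rw [this]
  apply List.map_congr_left
  intro k _
  simp only [Function.comp_apply]
  ring

-- the per-i contribution of A equals the per-i contribution of B
lemma inner_eq (n i : Int) (hi : 1 ≤ i) (hin : i < n) :
    ((PySem.List.pyRange (i+1) n 1).filter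
        (fun j => decide (PySem.Int.mod n (i + j) = 0))).flatMap (fun j => [i] ++ [j]) =
    (((PySem.List.pyRange 1 (n + 1) 1).filter
        (fun d => decide (PySem.Int.mod n d = 0))).filter
        (fun d => decide (i < d - i ∧ d - i < n))).flatMap (fun d => [i] ++ [d - i]) := by
  have key : ((PySem.List.pyRange (i+1) n 1).filter
        (fun j => decide (PySem.Int.mod n (i + j) = 0))).map (fun j => i + j)
      = ((PySem.List.pyRange 1 (n + 1) 1).filter
        (fun d => decide (PySem.Int.mod n d = 0))).filter
        (fun d => decide (i < d - i ∧ d - i < n)) := by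
    have hcomp : (fun j => decide (PySem.Int.mod n (i + j) = 0))
        = ((fun d => decide (PySem.Int.mod n d = 0)) ∘ (fun j : Int => i + j)) := rfl
    rw [hcomp, ← List.filter_map, map_add_pyRange, List.filter_filter]
    apply filter_pyRange_eq_filter_pyRange
    intro x
    simp only [decide_eq_true_eq, Bool.and_eq_true, PySem.Int.mod_eq_zero_iff_dvd]
    constructor
    · rintro ⟨⟨h1, h2⟩, hd⟩
      have hxle : x ≤ n := Int.le_of_dvd (by omega) hd
      exact ⟨⟨by omega, by omega⟩, ⟨by omega, by omega⟩, hd⟩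
    · rintro ⟨⟨h1, h2⟩, ⟨hb1, hb2⟩, hd⟩
      exact ⟨⟨by omega, by omega⟩, hd⟩
  rw [← key, List.flatMap_map]
  apply List.flatMap_congr
  intro j _
  have h : i + j - i = j := by ring
  rw [h]

theorem count_eq_count_alt (n : Int) : count n = count_alt n := by
  unfold count count_alt
  have hA : ∀ res i, (PySem.List.pyRange (i+1) n 1).foldl (fun result j =>
      if PySem.Int.mod n (i + j) = 0 then result ++ [i] ++ [j] else result) res
      = res ++ ((PySem.List.pyRange (i+1) n 1).filter
        (fun j => decide (PySem.Int.mod n (i + j) = 0))).flatMap (fun j => [i] ++ [j]) := by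
    intro res i
    rw [PySem.List.foldl_ite_eq_foldl_filter (p := fun j => PySem.Int.mod n (i + j) = 0)
        (f := fun result j => result ++ [i] ++ [j])]
    have : ∀ (l : List Int) (res : List Int),
        l.foldl (fun result j => result ++ [i] ++ [j]) res
        = res ++ l.flatMap (fun j => [i] ++ [j]) := by
      intro l
      induction l with
      | nil => intro res; simp
      | cons x t ih => intro res; simp [List.append_assoc, List.flatMap_def]
    exact this _ res
  have hB : ∀ res i, ((PySem.List.pyRange 1 (n + 1) 1).filter
        (fun d => decide (PySem.Int.mod n d = 0))).foldl (fun result d =>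
        let j := d - i
        if i < j ∧ j < n then result ++ [i] ++ [j] else result) res
      = res ++ (((PySem.List.pyRange 1 (n + 1) 1).filter
        (fun d => decide (PySem.Int.mod n d = 0))).filter
        (fun d => decide (i < d - i ∧ d - i < n))).flatMap (fun d => [i] ++ [d - i]) := by
    intro res i
    show ((PySem.List.pyRange 1 (n + 1) 1).filter
        (fun d => decide (PySem.Int.mod n d = 0))).foldl (fun result d =>
        if i < d - i ∧ d - i < n then result ++ [i] ++ [d - i] else result) res = _
    rw [PySem.List.foldl_ite_eq_foldl_filter (p := fun d => i < d - i ∧ d - i < n)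
        (f := fun result d => result ++ [i] ++ [d - i])]
    have : ∀ (l : List Int) (res : List Int),
        l.foldl (fun result d => result ++ [i] ++ [d - i]) res
        = res ++ l.flatMap (fun d => [i] ++ [d - i]) := by
      intro l
      induction l with
      | nil => intro res; simp
      | cons x t ih => intro res; simp [List.append_assoc, List.flatMap_def]
    exact this _ res
  calc (PySem.List.pyRange 1 n 1).foldl (fun result i =>
        (PySem.List.pyRange (i+1) n 1).foldl (fun result j =>
          if PySem.Int.mod n (i + j) = 0 then result ++ [i] ++ [j] else result) result) []
      = (PySem.List.pyRange 1 n 1).foldl (fun result i =>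
          result ++ ((PySem.List.pyRange (i+1) n 1).filter
            (fun j => decide (PySem.Int.mod n (i + j) = 0))).flatMap (fun j => [i] ++ [j])) [] := by
        apply PySem.List.foldl_congr_mem
        intro acc i _
        exact hA acc i
    _ = (PySem.List.pyRange 1 n 1).foldl (fun result i =>
          result ++ (((PySem.List.pyRange 1 (n + 1) 1).filter
            (fun d => decide (PySem.Int.mod n d = 0))).filter
            (fun d => decide (i < d - i ∧ d - i < n))).flatMap (fun d => [i] ++ [d - i])) [] := by
        apply PySem.List.foldl_congr_mem
        intro acc i hi
        rw [PySem.List.mem_pyRange_one] at hi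
        rw [inner_eq n i hi.1 hi.2]
    _ = (PySem.List.pyRange 1 n 1).foldl (fun result i =>
          ((PySem.List.pyRange 1 (n + 1) 1).filter
            (fun d => decide (PySem.Int.mod n d = 0))).foldl (fun result d =>
            let j := d - i
            if i < j ∧ j < n then result ++ [i] ++ [j] else result) result) [] := by
        apply PySem.List.foldl_congr_mem
        intro acc i _
        exact (hB acc i).symm

-- ===== VERDICT (by name: the statement is the Claim_ definition above) =====
theorem count_spec : Claim_equal_count := by
  intro n _
  unfold Spec_count
  exact count_eq_count_alt n
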